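-- pv_equiv track=rewrite | github.com/brodjieski/macos_security | scripts/create_rule.py | add_comments_to_yaml
-- ===== SOURCE A (Python) =====
-- def add_comments_to_yaml(yaml_text, comments):
--     """
--     Add comments to YAML text.
--
--     Args:
--         yaml_text: The YAML text to add comments to.
--         comments: Dictionary mapping field paths to comments.
--
--     Returns:
--         YAML text with comments added.
--     """
--     yaml_lines = yaml_text.split('\n')
--     result_lines = []
--
--     for i, line in enumerate(yaml_lines):
--         # Skip empty lines
--         if not line.strip():
--             result_lines.append(line)
--             continue
--
--         modified_line = line
--
--         # Add comments to the same line
--         for field, comment in comments.items():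
--             parts = field.split('.')
--
--             # Handle simple fields
--             if len(parts) == 1 and line.startswith(f"{parts[0]}:"):
--                 # Skip if discussion has content
--                 if parts[0] == "discussion" and not line.strip().endswith(":"):
--                     continue
--
--                 # Add inline comment after the value
--                 modified_line = f"{line}  {comment}"
--                 break
--
--             # Handle nested fields
--             elif len(parts) > 1:
--                 # Check for array notation like mobileconfig_info[0].PayloadType
--                 field_prefix = parts[0]
--                 if '[' in field_prefix:
--                     field_prefix = field_prefix.split('[')[0]
--
--                 # Find the line with this field
--                 if line.strip().startswith(parts[-1] + ":"):
--                     # Calculate the indentation level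
--                     spaces = len(line) - len(line.lstrip())
--
--                     # Find parent context
--                     context_match = True
--                     for j in range(i-1, -1, -1):
--                         context_line = yaml_lines[j]
--                         if len(context_line) - len(context_line.lstrip()) < spaces:
--                             parent_field = context_line.strip().split(':')[0]
--                             if parent_field != parts[-2]:
--                                 context_match = False
--                             break
--
--                     if context_match:
--                         # Add inline comment after the value
--                         modified_line = f"{line}  {comment}"
--                         break
--
--         result_lines.append(modified_line)
--
--     return '\n'.join(result_lines)
-- ===== SOURCE B (Python) =====
-- def add_comments_to_yaml(yaml_text, comments):
--     """Single pass: an indentation stack gives each line's parent field once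
--     per line, instead of a backward rescan per (line, comment) pair."""
--     yaml_lines = yaml_text.split('\n')
--     result_lines = []
--     stack = []  # (indent, field-before-':') of lines, strictly increasing indent
--
--     for line in yaml_lines:
--         stripped = line.strip()
--         indent = len(line) - len(line.lstrip())
--
--         # nearest previous line with strictly smaller indent = top of stack
--         while stack and stack[-1][0] >= indent:
--             stack.pop()
--         parent = stack[-1][1] if stack else None
--
--         if not stripped:
--             result_lines.append(line)
--         else:
--             out = line
--             for field, comment in comments.items():
--                 parts = field.split('.')
--                 if len(parts) == 1:
--                     if line.startswith(parts[0] + ":") and not (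
--                             parts[0] == "discussion" and not stripped.endswith(":")):
--                         out = line + "  " + comment
--                         break
--                 elif stripped.startswith(parts[-1] + ":"):
--                     if parent is None or parent == parts[-2]:
--                         out = line + "  " + comment
--                         break
--             result_lines.append(out)
--
--         stack.append((indent, stripped.split(':')[0]))
--
--     return '\n'.join(result_lines)
-- ===== Notes on version B (the rewrite author's own statement) =====
-- stated objective: alternative
-- what changed: B replaces A's per-(line,comment) backward rescan of all earlier lines for the parent context by a single indentation stack maintained in one forward pass, so each line's parent field is computed once per line.
import Mathlib
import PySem

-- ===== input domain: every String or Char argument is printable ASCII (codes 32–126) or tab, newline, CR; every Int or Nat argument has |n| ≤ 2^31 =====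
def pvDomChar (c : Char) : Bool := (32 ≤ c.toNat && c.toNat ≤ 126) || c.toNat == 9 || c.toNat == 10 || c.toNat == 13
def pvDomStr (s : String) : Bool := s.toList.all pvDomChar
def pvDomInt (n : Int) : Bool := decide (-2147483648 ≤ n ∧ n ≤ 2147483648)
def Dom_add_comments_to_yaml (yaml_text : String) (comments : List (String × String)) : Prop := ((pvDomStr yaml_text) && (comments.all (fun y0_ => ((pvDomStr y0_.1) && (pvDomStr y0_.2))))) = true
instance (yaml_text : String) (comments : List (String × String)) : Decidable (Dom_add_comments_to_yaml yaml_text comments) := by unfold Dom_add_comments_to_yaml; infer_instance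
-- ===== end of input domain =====

-- B replaces A's per-(line,comment) backward rescan for the parent line by a single
-- indentation stack maintained in one pass over the lines (objective: alternative algorithm).
-- 'comments' is a Python dict: both ports read it through PySem.Dict.ofList (last value
-- wins for a repeated key), exactly as dict(...) does.

-- shared tiny expressions of both Pythons:
-- len(line) - len(line.lstrip())
def pvIndent (line : String) : Int :=
  PySem.Str.len line - PySem.Str.len (PySem.Str.lstrip line)
-- s.split(':')[0]  (s.split(':') is never empty, so [0] is its head)
def pvKey (s : String) : String :=
  ((PySem.Str.split? s ":").getD []).headD ""

-- ===== PORT A =====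
-- the inner 'for j in range(i-1, -1, -1)' over the already-seen lines, newest first:
-- first line with indent < spaces yields parent_field = line.strip().split(':')[0]
def pvA_scan (revPrev : List String) (spaces : Int) : Option String :=
  match revPrev with
  | [] => none
  | cl :: rest =>
      if pvIndent cl < spaces then some (pvKey (PySem.Str.strip cl))
      else pvA_scan rest spaces

-- the 'for field, comment in comments.items()' loop with its break/continue;
-- result = modified_line (the Python's field_prefix is computed but never used; omitted)
def pvA_tryComments (yaml_lines : List String) (i : Int) (line : String) :
    List (String × String) → String
  | [] => line
  | (field, comment) :: rest =>
      let parts := (PySem.Str.split? field ".").getD []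
      if parts.length = 1 ∧ PySem.Str.startswith line (PySem.List.pyGetD parts 0 "" ++ ":") then
        if PySem.List.pyGetD parts 0 "" = "discussion" ∧
            ¬ PySem.Str.endswith (PySem.Str.strip line) ":" then
          pvA_tryComments yaml_lines i line rest                              -- continue
        else line ++ "  " ++ comment                                          -- break
      else if 1 < parts.length ∧
          PySem.Str.startswith (PySem.Str.strip line) (PySem.List.pyGetD parts (-1) "" ++ ":") then
        let spaces := pvIndent line
        match pvA_scan ((yaml_lines.take i.toNat).reverse) spaces with
        | none => line ++ "  " ++ comment                                     -- context_match stays True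
        | some parent_field =>
            if parent_field = PySem.List.pyGetD parts (-2) "" then
              line ++ "  " ++ comment                                         -- break
            else pvA_tryComments yaml_lines i line rest                       -- context_match False
      else pvA_tryComments yaml_lines i line rest

def add_comments_to_yaml (yaml_text : String) (comments : List (String × String)) : String :=
  let yaml_lines := (PySem.Str.split? yaml_text "\n").getD []
  let items := (PySem.Dict.ofList comments).items
  let result_lines := (PySem.List.enumerate yaml_lines).foldl
    (fun acc p =>
      if PySem.Str.strip p.2 = "" then acc ++ [p.2]
      else acc ++ [pvA_tryComments yaml_lines p.1 p.2 items]) []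
  PySem.Str.join "\n" result_lines

-- ===== PORT B =====
-- the comments loop of Source B: the parent field is a precomputed argument
def pvB_try (parent : Option String) (line stripped : String) :
    List (String × String) → String
  | [] => line
  | (field, comment) :: rest =>
      let parts := (PySem.Str.split? field ".").getD []
      if parts.length = 1 then
        if PySem.Str.startswith line (PySem.List.pyGetD parts 0 "" ++ ":") ∧
            ¬ (PySem.List.pyGetD parts 0 "" = "discussion" ∧
               ¬ PySem.Str.endswith stripped ":") then
          line ++ "  " ++ comment
        else pvB_try parent line stripped rest
      else if PySem.Str.startswith stripped (PySem.List.pyGetD parts (-1) "" ++ ":") ∧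
          (parent = none ∨ parent = some (PySem.List.pyGetD parts (-2) "")) then
        line ++ "  " ++ comment
      else pvB_try parent line stripped rest

-- one iteration of Source B's main loop; the Python keeps the stack top at the list's end,
-- the port keeps it at the head (push = cons, the pop-while = dropWhile)
def pvB_step (items : List (String × String)) (st : List String × List (Int × String))
    (line : String) : List String × List (Int × String) :=
  let stripped := PySem.Str.strip line
  let indent := pvIndent line
  let stack := st.2.dropWhile (fun e => decide (indent ≤ e.1))
  let parent := stack.head?.map (·.2)
  let out := if stripped = "" then line else pvB_try parent line stripped items
  (st.1 ++ [out], (indent, pvKey stripped) :: stack)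

def add_comments_to_yaml_alt (yaml_text : String) (comments : List (String × String)) : String :=
  let yaml_lines := (PySem.Str.split? yaml_text "\n").getD []
  let items := (PySem.Dict.ofList comments).items
  PySem.Str.join "\n" (yaml_lines.foldl (pvB_step items) ([], [])).1

-- ===== PRECONDITION & SPEC =====
def Spec_add_comments_to_yaml (yaml_text : String) (comments : List (String × String)) (out : String) : Prop := out = add_comments_to_yaml_alt yaml_text comments
instance (yaml_text : String) (comments : List (String × String)) (out : String) : Decidable (Spec_add_comments_to_yaml yaml_text comments out) := by unfold Spec_add_comments_to_yaml; infer_instance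

-- ===== CLAIM (what is proved, stated in full; the proofs are below) =====
def Claim_equal_add_comments_to_yaml : Prop := ∀ (yaml_text : String) (comments : List (String × String)), Dom_add_comments_to_yaml yaml_text comments → Spec_add_comments_to_yaml yaml_text comments (add_comments_to_yaml yaml_text comments)

-- ===== LEMMAS AND PROOFS =====

-- s.split(sep) is never the empty list (its go loop always returns a reversed cons)
lemma pv_go_ne_nil (sep : List Char) :
    ∀ (fuel : Nat) (l cur : List Char) (acc : List (List Char)),
      PySem.Chars.splitOn.go sep fuel l cur acc ≠ [] := by
  intro fuel
  induction fuel with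
  | zero => intro l cur acc; simp [PySem.Chars.splitOn.go]
  | succ n ih =>
    intro l cur acc
    cases l with
    | nil => simp [PySem.Chars.splitOn.go]
    | cons c rest =>
      rw [PySem.Chars.splitOn.go]
      split
      · exact ih _ _ _
      · exact ih _ _ _

lemma pv_parts_len (field : String) :
    1 ≤ ((PySem.Str.split? field ".").getD []).length := by
  have h2 : PySem.Chars.splitOn field.toList ".".toList ≠ [] := by
    simp only [PySem.Chars.splitOn]
    exact pv_go_ne_nil _ _ _ _ _
  have e : PySem.Str.split? field "."
      = some ((PySem.Chars.splitOn field.toList ".".toList).map String.ofList) := rfl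
  rw [e, Option.getD_some, List.length_map]
  have := List.length_pos_iff.mpr h2
  omega

-- dropping a q-prefix first does not change a p-prefix drop when q implies p
lemma pv_dropWhile_dropWhile {α : Type} (p q : α → Bool) (l : List α)
    (h : ∀ x, q x = true → p x = true) :
    (l.dropWhile q).dropWhile p = l.dropWhile p := by
  induction l with
  | nil => rfl
  | cons x t ih =>
    by_cases hq : q x = true
    · rw [List.dropWhile_cons, if_pos hq, ih, List.dropWhile_cons, if_pos (h x hq)]
    · rw [List.dropWhile_cons, if_neg hq]

-- A's comments loop equals B's, given B's parent = A's backward scan result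
lemma pv_try_eq (yaml_lines : List String) (i : Int) (line : String)
    (parent : Option String)
    (hp : parent = pvA_scan ((yaml_lines.take i.toNat).reverse) (pvIndent line)) :
    ∀ items, pvA_tryComments yaml_lines i line items
      = pvB_try parent line (PySem.Str.strip line) items := by
  subst hp
  intro items
  induction items with
  | nil => rfl
  | cons fc rest ih =>
    obtain ⟨field, comment⟩ := fc
    have hlen := pv_parts_len field
    simp only [pvA_tryComments, pvB_try]
    set parts := (PySem.Str.split? field ".").getD [] with hparts
    by_cases h1 : parts.length = 1
    · by_cases h2 : PySem.Str.startswith line (PySem.List.pyGetD parts 0 "" ++ ":") = true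
      · by_cases h3 : PySem.List.pyGetD parts 0 "" = "discussion" ∧
            ¬ PySem.Str.endswith (PySem.Str.strip line) ":" = true
        · rw [if_pos ⟨h1, h2⟩, if_pos h3, if_pos h1, if_neg (fun hc => hc.2 h3)]
          exact ih
        · rw [if_pos ⟨h1, h2⟩, if_neg h3, if_pos h1, if_pos ⟨h2, h3⟩]
      · rw [if_neg (fun hc => h2 hc.2), if_neg (fun hc => by omega),
          if_pos h1, if_neg (fun hc => h2 hc.1)]
        exact ih
    · have h1' : 1 < parts.length := by omega
      rw [if_neg (fun hc => h1 hc.1), if_neg h1]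
      by_cases h4 : PySem.Str.startswith (PySem.Str.strip line)
          (PySem.List.pyGetD parts (-1) "" ++ ":") = true
      · rw [if_pos ⟨h1', h4⟩]
        cases hsc : pvA_scan ((yaml_lines.take i.toNat).reverse) (pvIndent line) with
        | none => rw [if_pos ⟨h4, Or.inl rfl⟩]
        | some pf =>
          rw [hsc] at ih
          change (if pf = PySem.List.pyGetD parts (-2) "" then line ++ "  " ++ comment
            else pvA_tryComments yaml_lines i line rest) = _
          by_cases h5 : pf = PySem.List.pyGetD parts (-2) ""
          · rw [if_pos h5, if_pos ⟨h4, Or.inr (by rw [h5])⟩]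
          · rw [if_neg h5, if_neg (fun hc => by
                rcases hc.2 with h | h
                · cases h
                · exact h5 (Option.some.inj h))]
            exact ih
      · rw [if_neg (fun hc => h4 hc.2), if_neg (fun hc => h4 hc.1)]
        exact ih

-- the stack invariant: querying B's stack is A's backward scan over the seen prefix
def pvInv (pre : List String) (st : List (Int × String)) : Prop :=
  ∀ s : Int, ((st.dropWhile (fun e => decide (s ≤ e.1))).head?).map (·.2)
    = pvA_scan pre.reverse s

lemma pv_inv_nil : pvInv [] [] := by intro s; rfl

lemma pv_inv_step (pre : List String) (l : String) (st : List (Int × String))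
    (hinv : pvInv pre st) :
    pvInv (pre ++ [l])
      ((pvIndent l, pvKey (PySem.Str.strip l)) ::
        st.dropWhile (fun e => decide (pvIndent l ≤ e.1))) := by
  intro s
  rw [List.reverse_append]
  simp only [List.reverse_singleton, List.singleton_append, pvA_scan]
  by_cases hs : pvIndent l < s
  · rw [if_pos hs, List.dropWhile_cons, if_neg (by simp only [decide_eq_true_eq]; omega)]
    simp only [List.head?_cons, Option.map_some]
  · rw [if_neg hs, List.dropWhile_cons, if_pos (by simp only [decide_eq_true_eq]; omega)]
    rw [pv_dropWhile_dropWhile (fun e => decide (s ≤ e.1))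
      (fun e => decide (pvIndent l ≤ e.1)) st
      (fun x hx => by simp only [decide_eq_true_eq] at hx ⊢; omega)]
    exact hinv s

-- the main loops agree, from any consistent prefix/stack state
lemma pv_loop (items : List (String × String)) (full : List String) :
    ∀ (suffix pre accA : List String) (st : List (Int × String)),
      pre ++ suffix = full → pvInv pre st →
      (PySem.List.enumerate suffix (pre.length : Int)).foldl
        (fun acc p =>
          if PySem.Str.strip p.2 = "" then acc ++ [p.2]
          else acc ++ [pvA_tryComments full p.1 p.2 items]) accA
      = (suffix.foldl (pvB_step items) (accA, st)).1 := by
  intro suffix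
  induction suffix with
  | nil => intro pre accA st _ _; rfl
  | cons l rest ih =>
    intro pre accA st hfull hinv
    have htake : full.take pre.length = pre := by rw [← hfull, List.take_left]
    rw [PySem.List.enumerate_cons, List.foldl_cons, List.foldl_cons]
    have hparent : ((st.dropWhile (fun e => decide (pvIndent l ≤ e.1))).head?).map (·.2)
        = pvA_scan ((full.take (pre.length : Int).toNat).reverse) (pvIndent l) := by
      rw [Int.toNat_natCast, htake]; exact hinv (pvIndent l)
    have hout :
        (if PySem.Str.strip l = "" then accA ++ [l]
         else accA ++ [pvA_tryComments full (pre.length : Int) l items])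
        = (pvB_step items (accA, st) l).1 := by
      simp only [pvB_step]
      by_cases hb : PySem.Str.strip l = ""
      · rw [if_pos hb, if_pos hb]
      · rw [if_neg hb, if_neg hb,
          pv_try_eq full (pre.length : Int) l _ hparent items]
    rw [hout]
    have hst2 : (pvB_step items (accA, st) l).2
        = (pvIndent l, pvKey (PySem.Str.strip l)) ::
            st.dropWhile (fun e => decide (pvIndent l ≤ e.1)) := rfl
    have hrec := ih (pre ++ [l]) (pvB_step items (accA, st) l).1
      (pvB_step items (accA, st) l).2
      (by rw [← hfull]; simp) (by rw [hst2]; exact pv_inv_step pre l st hinv)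
    simp only [List.length_append, List.length_singleton, Nat.cast_add, Nat.cast_one] at hrec
    exact hrec

-- ===== VERDICT (by name: the statement is the Claim_ definition above) =====
theorem add_comments_to_yaml_spec : Claim_equal_add_comments_to_yaml := by
  unfold Claim_equal_add_comments_to_yaml
  intro yaml_text comments _
  unfold Spec_add_comments_to_yaml add_comments_to_yaml add_comments_to_yaml_alt
  exact congrArg (PySem.Str.join "\n")
    (pv_loop ((PySem.Dict.ofList comments).items)
      ((PySem.Str.split? yaml_text "\n").getD [])
      ((PySem.Str.split? yaml_text "\n").getD []) [] [] [] rfl pv_inv_nil)
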